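-- pv_equiv track=rewrite | github.com/SpartanCat7/MDA-611 | Grupo2 - Practica Hito 2 - MachineLearning/Analizador_de_Datos.py | generar_resultados
-- ===== SOURCE A (Python) =====
-- def generar_resultados(lista_datos_normalizada, lista_palabras_optimistas, lista_palabras_pesimistas):
--     lista_personalidades = []
--     for respuesta_encuesta in lista_datos_normalizada:
--         contador_optimista = 0
--         contador_pesimista = 0
--         for respuesta_pregunta in respuesta_encuesta:
--             for palabra in respuesta_pregunta:
--                 if palabra in lista_palabras_optimistas:
--                     contador_optimista += 1
--                 if palabra in lista_palabras_pesimistas: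
--                     contador_pesimista += 1
--
--         if (contador_optimista >= contador_pesimista):
--             lista_personalidades.append("Optimista")
--         else:
--             lista_personalidades.append("Pesimista")
--
--     return lista_personalidades
-- ===== SOURCE B (Python) =====
-- def generar_resultados(lista_datos_normalizada, lista_palabras_optimistas, lista_palabras_pesimistas):
--     set_optimistas = set(lista_palabras_optimistas)
--     set_pesimistas = set(lista_palabras_pesimistas)
--     lista_personalidades = []
--     for respuesta_encuesta in lista_datos_normalizada:
--         frecuencia = {}
--         for respuesta_pregunta in respuesta_encuesta:
--             for palabra in respuesta_pregunta:
--                 frecuencia[palabra] = frecuencia.get(palabra, 0) + 1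
--         contador_optimista = sum(frecuencia.get(w, 0) for w in set_optimistas)
--         contador_pesimista = sum(frecuencia.get(w, 0) for w in set_pesimistas)
--         lista_personalidades.append("Optimista" if contador_optimista >= contador_pesimista else "Pesimista")
--     return lista_personalidades
-- ===== Notes on version B (the rewrite author's own statement) =====
-- stated objective: faster
-- what changed: B pre-deduplicates each vocabulary into a set once and, per survey, builds a word-frequency dict in one pass, then sums frequencies by iterating over the vocabulary sets instead of scanning both vocabulary lists for every word occurrence.
import Mathlib
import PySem

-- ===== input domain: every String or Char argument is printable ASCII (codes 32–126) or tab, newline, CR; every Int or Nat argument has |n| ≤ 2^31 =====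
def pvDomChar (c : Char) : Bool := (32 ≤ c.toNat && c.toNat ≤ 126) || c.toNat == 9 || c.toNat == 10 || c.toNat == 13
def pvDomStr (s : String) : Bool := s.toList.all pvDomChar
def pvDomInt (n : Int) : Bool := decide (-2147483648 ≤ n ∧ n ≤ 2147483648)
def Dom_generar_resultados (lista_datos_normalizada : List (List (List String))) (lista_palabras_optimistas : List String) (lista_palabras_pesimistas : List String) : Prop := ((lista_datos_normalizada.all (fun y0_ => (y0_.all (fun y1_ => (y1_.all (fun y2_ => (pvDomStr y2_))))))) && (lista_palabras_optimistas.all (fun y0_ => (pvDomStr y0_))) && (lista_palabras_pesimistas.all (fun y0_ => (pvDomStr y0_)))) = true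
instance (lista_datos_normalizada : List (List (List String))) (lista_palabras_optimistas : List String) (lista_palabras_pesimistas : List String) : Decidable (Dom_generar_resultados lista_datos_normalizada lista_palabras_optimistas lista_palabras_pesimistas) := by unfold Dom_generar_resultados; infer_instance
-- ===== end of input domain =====

-- B pre-deduplicates each vocabulary into a set and per survey builds a frequency dict in one
-- pass, then sums frequencies by iterating the vocabulary sets (alternative traversal, same result).


-- ===== PORT A =====
def generar_resultados (lista_datos_normalizada : List (List (List String))) (lista_palabras_optimistas : List String) (lista_palabras_pesimistas : List String) : List String :=
  lista_datos_normalizada.foldl (fun lista_personalidades respuesta_encuesta =>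
    let contadores : Int × Int :=
      respuesta_encuesta.foldl (fun c respuesta_pregunta =>
        respuesta_pregunta.foldl (fun c palabra =>
          let c := if palabra ∈ lista_palabras_optimistas then (c.1 + 1, c.2) else c
          if palabra ∈ lista_palabras_pesimistas then (c.1, c.2 + 1) else c) c) (0, 0)
    if contadores.1 ≥ contadores.2 then lista_personalidades ++ ["Optimista"]
    else lista_personalidades ++ ["Pesimista"]) []

-- ===== PORT B =====
def generar_resultados_alt (lista_datos_normalizada : List (List (List String))) (lista_palabras_optimistas : List String) (lista_palabras_pesimistas : List String) : List String :=
  let set_optimistas := PySem.Set.ofList lista_palabras_optimistas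
  let set_pesimistas := PySem.Set.ofList lista_palabras_pesimistas
  lista_datos_normalizada.foldl (fun lista_personalidades respuesta_encuesta =>
    let frecuencia : PySem.Dict String Int :=
      respuesta_encuesta.foldl (fun d respuesta_pregunta =>
        respuesta_pregunta.foldl (fun d palabra => d.insert palabra (d.getD palabra 0 + 1)) d)
        PySem.Dict.empty
    let contador_optimista := (set_optimistas.map (fun w => frecuencia.getD w 0)).sum
    let contador_pesimista := (set_pesimistas.map (fun w => frecuencia.getD w 0)).sum
    lista_personalidades ++
      [if contador_optimista ≥ contador_pesimista then "Optimista" else "Pesimista"]) []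

-- ===== PRECONDITION & SPEC =====
def Spec_generar_resultados (lista_datos_normalizada : List (List (List String))) (lista_palabras_optimistas : List String) (lista_palabras_pesimistas : List String) (out : List String) : Prop := out = generar_resultados_alt lista_datos_normalizada lista_palabras_optimistas lista_palabras_pesimistas
instance (lista_datos_normalizada : List (List (List String))) (lista_palabras_optimistas : List String) (lista_palabras_pesimistas : List String) (out : List String) : Decidable (Spec_generar_resultados lista_datos_normalizada lista_palabras_optimistas lista_palabras_pesimistas out) := by unfold Spec_generar_resultados; infer_instance

-- ===== CLAIM (what is proved, stated in full; the proofs are below) =====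
def Claim_equal_generar_resultados : Prop := ∀ (lista_datos_normalizada : List (List (List String))) (lista_palabras_optimistas : List String) (lista_palabras_pesimistas : List String), Dom_generar_resultados lista_datos_normalizada lista_palabras_optimistas lista_palabras_pesimistas → Spec_generar_resultados lista_datos_normalizada lista_palabras_optimistas lista_palabras_pesimistas (generar_resultados lista_datos_normalizada lista_palabras_optimistas lista_palabras_pesimistas)

-- ===== LEMMAS AND PROOFS =====

-- A's per-survey counting loop adds countP(is-optimista) / countP(is-pesimista) to the accumulator.
theorem pvCountPair (opt pes : List String) (ws : List String) (c : Int × Int) :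
    ws.foldl (fun c palabra =>
        let c := if palabra ∈ opt then (c.1 + 1, c.2) else c
        if palabra ∈ pes then (c.1, c.2 + 1) else c) c
      = (c.1 + (ws.countP (· ∈ opt) : Int), c.2 + (ws.countP (· ∈ pes) : Int)) := by
  induction ws generalizing c with
  | nil => simp
  | cons w t ih =>
    simp only [List.foldl_cons, List.countP_cons, ih]
    by_cases ho : w ∈ opt <;> by_cases hp : w ∈ pes <;>
      simp [ho, hp, Prod.ext_iff] <;> omega

-- summing the indicator of one word over a duplicate-free list is the membership test
theorem pvSumIndicator (L : List String) (hnd : L.Nodup) (w : String) :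
    (L.map (fun v => if w = v then (1 : Int) else 0)).sum = if w ∈ L then 1 else 0 := by
  induction L with
  | nil => simp
  | cons v t ih =>
    rcases List.nodup_cons.mp hnd with ⟨hv, hnt⟩
    by_cases hw : w = v
    · subst hw
      simp [List.map_congr_left (fun x hx => if_neg (fun h : w = x => hv (h ▸ hx)))]
    · simp [hw, ih hnt]

-- summing per-word frequencies over the deduplicated vocabulary = counting membership occurrences
theorem pvSumDedupCount (S ws : List String) :
    ((PySem.Set.ofList S).map (fun w => ((ws.count w : Nat) : Int))).sum
      = (ws.countP (· ∈ S) : Int) := by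
  induction ws with
  | nil => simp
  | cons x t ih =>
    have hstep : ((PySem.Set.ofList S).map (fun w => (((x :: t).count w : Nat) : Int))).sum
        = ((PySem.Set.ofList S).map (fun w => ((t.count w : Nat) : Int))).sum
          + ((PySem.Set.ofList S).map (fun w => if x = w then (1 : Int) else 0)).sum := by
      rw [← PySem.List.sum_map_add_int]
      congr 1
      refine List.map_congr_left (fun w _ => ?_)
      by_cases h : x = w <;> simp [h]
    rw [hstep, ih, pvSumIndicator _ (PySem.Set.nodup_ofList S) x, List.countP_cons]
    by_cases hx : x ∈ S <;>
      simp [hx, PySem.Set.mem_ofList]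

-- per-survey equality: A's pair of membership counters decides like B's frequency sums
theorem pvSurvey (opt pes : List String) (e : List (List String)) :
    (let contadores : Int × Int :=
       e.foldl (fun c q => q.foldl (fun c palabra =>
         let c := if palabra ∈ opt then (c.1 + 1, c.2) else c
         if palabra ∈ pes then (c.1, c.2 + 1) else c) c) (0, 0)
     if contadores.1 ≥ contadores.2 then "Optimista" else "Pesimista")
    = (let frecuencia : PySem.Dict String Int :=
         e.foldl (fun d q => q.foldl (fun d w => d.insert w (d.getD w 0 + 1)) d) PySem.Dict.empty
       if ((PySem.Set.ofList opt).map (fun w => frecuencia.getD w 0)).sum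
            ≥ ((PySem.Set.ofList pes).map (fun w => frecuencia.getD w 0)).sum
       then "Optimista" else "Pesimista") := by
  have hA := List.foldl_flatten (L := e)
      (f := fun (c : Int × Int) palabra =>
        let c := if palabra ∈ opt then (c.1 + 1, c.2) else c
        if palabra ∈ pes then (c.1, c.2 + 1) else c) (b := ((0 : Int), (0 : Int)))
  have hB := List.foldl_flatten (L := e)
      (f := fun (d : PySem.Dict String Int) w => d.insert w (d.getD w 0 + 1))
      (b := PySem.Dict.empty)
  simp only [← hA, ← hB, PySem.Dict.foldl_insert_getD_add_one_eq_counter,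
    pvCountPair opt pes e.flatten (0, 0), PySem.Dict.getD_counter, zero_add,
    pvSumDedupCount]

-- the two output-building folds agree for any accumulator
theorem pvFoldEq (opt pes : List String) (l : List (List (List String))) (acc : List String) :
    l.foldl (fun lista respuesta_encuesta =>
      let contadores : Int × Int :=
        respuesta_encuesta.foldl (fun c q => q.foldl (fun c palabra =>
          let c := if palabra ∈ opt then (c.1 + 1, c.2) else c
          if palabra ∈ pes then (c.1, c.2 + 1) else c) c) (0, 0)
      if contadores.1 ≥ contadores.2 then lista ++ ["Optimista"] else lista ++ ["Pesimista"]) acc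
    = l.foldl (fun lista respuesta_encuesta =>
      let frecuencia : PySem.Dict String Int :=
        respuesta_encuesta.foldl (fun d q => q.foldl (fun d w => d.insert w (d.getD w 0 + 1)) d)
          PySem.Dict.empty
      lista ++
        [if ((PySem.Set.ofList opt).map (fun w => frecuencia.getD w 0)).sum
              ≥ ((PySem.Set.ofList pes).map (fun w => frecuencia.getD w 0)).sum
          then "Optimista" else "Pesimista"]) acc := by
  induction l generalizing acc with
  | nil => rfl
  | cons e t ih =>
    simp only [List.foldl_cons]
    rw [← ih]
    congr 1
    have h := pvSurvey opt pes e
    simp only at h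
    split <;> rw [← h] <;> simp_all

-- ===== VERDICT (by name: the statement is the Claim_ definition above) =====
theorem generar_resultados_spec : Claim_equal_generar_resultados := by
  intro ldn opt pes _
  unfold Spec_generar_resultados generar_resultados generar_resultados_alt
  exact pvFoldEq opt pes ldn []
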